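-- pv_equiv track=rewrite | github.com/oferweintraub/mind-videos | src/utils/image_utils.py | get_default_pattern
-- ===== SOURCE A (Python) =====
-- PATTERNS = {
--     3: [1, 2, 3],           # 3 segments, 3 images - one each
--     4: [1, 1, 2, 2],        # 4 segments, 2 images
--     5: [1, 1, 2, 2, 3],     # 5 segments, 3 images (default)
--     6: [1, 1, 2, 2, 3, 3],  # 6 segments, 3 images
--     7: [1, 1, 2, 2, 3, 3, 3],  # 7 segments, 3 images
--     8: [1, 1, 2, 2, 3, 3, 3, 3],  # 8 segments, 3 images
-- }
--
-- def get_default_pattern(num_segments: int) -> list[int]: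
--     """Get the default image reuse pattern for a given number of segments.
--
--     Args:
--         num_segments: Number of segments in the video
--
--     Returns:
--         List of image indices (1-indexed) for each segment
--     """
--     if num_segments in PATTERNS:
--         return PATTERNS[num_segments]
--
--     # For other counts, distribute 3 images evenly
--     pattern = []
--     images_per_segment = [0, 0, 0]
--     for i in range(num_segments):
--         # Round-robin with preference for earlier images
--         idx = min(i // ((num_segments + 2) // 3), 2)
--         images_per_segment[idx] += 1
--
--     # Build pattern
--     for img_idx, count in enumerate(images_per_segment):
--         pattern.extend([img_idx + 1] * count)
--
--     return pattern
-- ===== SOURCE B (Python) =====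
-- PATTERNS = {
--     3: [1, 2, 3],
--     4: [1, 1, 2, 2],
--     5: [1, 1, 2, 2, 3],
--     6: [1, 1, 2, 2, 3, 3],
--     7: [1, 1, 2, 2, 3, 3, 3],
--     8: [1, 1, 2, 2, 3, 3, 3, 3],
-- }
--
-- def get_default_pattern(num_segments: int) -> list[int]:
--     if num_segments in PATTERNS:
--         return PATTERNS[num_segments]
--     block = (num_segments + 2) // 3
--     return [min(i // block, 2) + 1 for i in range(num_segments)]
-- ===== Notes on version B (the rewrite author's own statement) =====
-- stated objective: simpler
-- what changed: The fallback emits each segment's image index directly in a single comprehension (min(i//block,2)+1), instead of accumulating a per-image histogram and reconstructing the list in a second loop; this is exact because i//block is non-decreasing over the range.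
import Mathlib
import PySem

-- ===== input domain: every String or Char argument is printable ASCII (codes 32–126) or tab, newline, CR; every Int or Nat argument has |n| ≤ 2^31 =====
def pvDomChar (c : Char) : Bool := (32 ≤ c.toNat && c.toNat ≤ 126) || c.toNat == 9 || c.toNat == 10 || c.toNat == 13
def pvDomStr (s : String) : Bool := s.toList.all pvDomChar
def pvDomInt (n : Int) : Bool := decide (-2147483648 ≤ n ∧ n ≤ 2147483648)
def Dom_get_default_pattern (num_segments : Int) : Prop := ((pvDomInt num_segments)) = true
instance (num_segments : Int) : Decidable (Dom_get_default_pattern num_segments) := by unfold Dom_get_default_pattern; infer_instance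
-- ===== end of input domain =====

-- B's fallback builds the list in one direct pass instead of A's histogram + reconstruction loop (objective: simpler).

-- ===== PORT A =====
def PATTERNS : PySem.Dict Int (List Int) := PySem.Dict.ofList
  [(3, [1, 2, 3]), (4, [1, 1, 2, 2]), (5, [1, 1, 2, 2, 3]),
   (6, [1, 1, 2, 2, 3, 3]), (7, [1, 1, 2, 2, 3, 3, 3]), (8, [1, 1, 2, 2, 3, 3, 3, 3])]

def get_default_pattern (num_segments : Int) : List Int :=
  match PATTERNS.get? num_segments with
  | some p => p
  | none =>
    -- for i in range(num_segments): images_per_segment[idx] += 1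
    let images_per_segment : List Int :=
      (PySem.List.pyRange 0 num_segments 1).foldl
        (fun cs i =>
          let idx := min (PySem.Int.floordiv i (PySem.Int.floordiv (num_segments + 2) 3)) 2
          PySem.List.pySetD cs idx (PySem.List.pyGetD cs idx 0 + 1))
        [0, 0, 0]
    -- for img_idx, count in enumerate(...): pattern.extend([img_idx+1]*count)
    (PySem.List.enumerate images_per_segment 0).foldl
      (fun pattern p => pattern ++ PySem.List.pyRepeat [p.1 + 1] p.2) []

-- ===== PORT B =====
def get_default_pattern_alt (num_segments : Int) : List Int :=
  match PATTERNS.get? num_segments with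
  | some p => p
  | none =>
    let block := PySem.Int.floordiv (num_segments + 2) 3
    (PySem.List.pyRange 0 num_segments 1).map
      (fun i => min (PySem.Int.floordiv i block) 2 + 1)

-- ===== PRECONDITION & SPEC =====
def Spec_get_default_pattern (num_segments : Int) (out : List Int) : Prop := out = get_default_pattern_alt num_segments
instance (num_segments : Int) (out : List Int) : Decidable (Spec_get_default_pattern num_segments out) := by unfold Spec_get_default_pattern; infer_instance

-- ===== CLAIM (what is proved, stated in full; the proofs are below) =====
def Claim_equal_get_default_pattern : Prop := ∀ (num_segments : Int), Dom_get_default_pattern num_segments → Spec_get_default_pattern num_segments (get_default_pattern num_segments)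

-- ===== LEMMAS AND PROOFS =====

-- A's histogram over range k, in closed form.
lemma pv_fold_counts (b : Int) (hb : 0 < b) (k : Nat) :
    (List.range k).foldl
      (fun cs (j : Nat) =>
        PySem.List.pySetD cs (min (PySem.Int.floordiv (j : Int) b) 2)
          (PySem.List.pyGetD cs (min (PySem.Int.floordiv (j : Int) b) 2) 0 + 1))
      ([0, 0, 0] : List Int)
    = [((min b.toNat k : Nat) : Int),
       ((min (2 * b.toNat) k - min b.toNat k : Nat) : Int),
       ((k - min (2 * b.toNat) k : Nat) : Int)] := by
  induction k with
  | zero => simp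
  | succ k ih =>
    rw [List.range_succ, List.foldl_append, ih]
    simp only [List.foldl_cons, List.foldl_nil]
    have hk0 : (0:Int) ≤ (k:Int) := Int.natCast_nonneg k
    have hfd : PySem.Int.floordiv (k:Int) b = (k:Int) / b :=
      PySem.Int.floordiv_eq_ediv_of_pos hb
    by_cases h1 : (k:Int) < b
    · have hq : min (PySem.Int.floordiv (k:Int) b) 2 = 0 := by
        rw [hfd, Int.ediv_eq_zero_of_lt hk0 h1]; rfl
      rw [hq]
      simp [PySem.List.pySetD, PySem.List.pySet?, PySem.List.pyGetD, PySem.List.pyGet?,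
        PySem.List.pyIdx?, List.set]
      refine ⟨?_, ?_, ?_⟩ <;> omega
    · by_cases h2 : (k:Int) < 2 * b
      · have hq : min (PySem.Int.floordiv (k:Int) b) 2 = 1 := by
          have : PySem.Int.floordiv (k:Int) b = 1 :=
            (PySem.Int.floordiv_eq_iff_of_pos hb).mpr ⟨by omega, by omega⟩
          rw [this]; rfl
        rw [hq]
        simp [PySem.List.pySetD, PySem.List.pySet?, PySem.List.pyGetD, PySem.List.pyGet?,
          PySem.List.pyIdx?, List.set]
        refine ⟨?_, ?_, ?_⟩ <;> omega
      · have hq : min (PySem.Int.floordiv (k:Int) b) 2 = 2 := by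
          have h2le : (2:Int) ≤ PySem.Int.floordiv (k:Int) b := by
            rw [PySem.Int.le_floordiv_iff_mul_le hb]; omega
          omega
        rw [hq]
        simp [PySem.List.pySetD, PySem.List.pySet?, PySem.List.pyGetD, PySem.List.pyGet?,
          PySem.List.pyIdx?, List.set]
        refine ⟨?_, ?_, ?_⟩ <;> omega

-- B's single pass over range k, as three replicate blocks.
lemma pv_map_pattern (b : Int) (hb : 0 < b) (k : Nat) :
    (List.range k).map (fun (j : Nat) => min (PySem.Int.floordiv (j : Int) b) 2 + 1)
    = List.replicate (min b.toNat k) (1 : Int)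
      ++ List.replicate (min (2 * b.toNat) k - min b.toNat k) 2
      ++ List.replicate (k - min (2 * b.toNat) k) 3 := by
  induction k with
  | zero => simp
  | succ k ih =>
    rw [List.range_succ, List.map_append, ih]
    simp only [List.map_cons, List.map_nil]
    have hk0 : (0:Int) ≤ (k:Int) := Int.natCast_nonneg k
    have hfd : PySem.Int.floordiv (k:Int) b = (k:Int) / b :=
      PySem.Int.floordiv_eq_ediv_of_pos hb
    by_cases h1 : (k:Int) < b
    · have hq : min (PySem.Int.floordiv (k:Int) b) 2 + 1 = 1 := by
        rw [hfd, Int.ediv_eq_zero_of_lt hk0 h1]; rfl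
      have a1 : min b.toNat k = k := by omega
      have a2 : min (2 * b.toNat) k = k := by omega
      have a3 : min b.toNat (k + 1) = k + 1 := by omega
      have a4 : min (2 * b.toNat) (k + 1) = k + 1 := by omega
      rw [hq, a1, a2, a3, a4]
      simp [List.replicate_succ']
    · by_cases h2 : (k:Int) < 2 * b
      · have hq : min (PySem.Int.floordiv (k:Int) b) 2 + 1 = 2 := by
          have : PySem.Int.floordiv (k:Int) b = 1 :=
            (PySem.Int.floordiv_eq_iff_of_pos hb).mpr ⟨by omega, by omega⟩
          rw [this]; rfl
        have a1 : min b.toNat k = b.toNat := by omega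
        have a2 : min (2 * b.toNat) k = k := by omega
        have a3 : min b.toNat (k + 1) = b.toNat := by omega
        have a4 : min (2 * b.toNat) (k + 1) = k + 1 := by omega
        have a5 : k + 1 - b.toNat = (k - b.toNat) + 1 := by omega
        rw [hq, a1, a2, a3, a4, a5]
        simp [List.replicate_succ', List.append_assoc]
      · have hq : min (PySem.Int.floordiv (k:Int) b) 2 + 1 = 3 := by
          have h2le : (2:Int) ≤ PySem.Int.floordiv (k:Int) b := by
            rw [PySem.Int.le_floordiv_iff_mul_le hb]; omega
          omega
        have a1 : min b.toNat k = b.toNat := by omega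
        have a2 : min (2 * b.toNat) k = 2 * b.toNat := by omega
        have a3 : min b.toNat (k + 1) = b.toNat := by omega
        have a4 : min (2 * b.toNat) (k + 1) = 2 * b.toNat := by omega
        have a5 : k + 1 - 2 * b.toNat = (k - 2 * b.toNat) + 1 := by omega
        rw [hq, a1, a2, a3, a4, a5]
        simp [List.replicate_succ', List.append_assoc]

-- ===== VERDICT (by name: the statement is the Claim_ definition above) =====
theorem get_default_pattern_spec : Claim_equal_get_default_pattern := by
  intro n _
  unfold Spec_get_default_pattern get_default_pattern get_default_pattern_alt
  cases hp : PATTERNS.get? n with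
  | some p => simp
  | none =>
    simp only []
    by_cases hn : n ≤ 0
    · rw [PySem.List.pyRange_one_eq_nil hn]
      simp [PySem.List.enumerate, PySem.List.pyRepeat]
    · rw [not_le] at hn
      have hb : 0 < PySem.Int.floordiv (n + 2) 3 := by
        rw [PySem.Int.floordiv_eq_ediv_of_pos (by norm_num)]
        omega
      rw [PySem.List.pyRange_one]
      simp only [sub_zero, zero_add]
      rw [List.foldl_map, List.map_map]
      simp only [Function.comp_def]
      rw [pv_fold_counts _ hb, pv_map_pattern _ hb]
      simp [PySem.List.enumerate, PySem.List.pyRepeat_singleton]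
      have h1 : (min (max ((n + 2) / 3) 0) (max n 0)).toNat = min ((n + 2) / 3).toNat n.toNat := by
        omega
      have h3 : (max n 0 - min (2 * max ((n + 2) / 3) 0) (max n 0)).toNat
          = n.toNat - min (2 * ((n + 2) / 3).toNat) n.toNat := by
        omega
      rw [h1, h3]
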